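-- pv_equiv track=rewrite | github.com/JuanBap/Taller3ADA | todos_juntos.py | max_const_var_bottom_up
-- ===== SOURCE A (Python) =====
-- def max_const_var_bottom_up(P):
--     n = len(P)
--     if n < 2:
--         return n
--     max_len = 1
--
--     for i in range(1, n):
--         diff = P[i] - P[i - 1]
--         length = 2
--         for j in range(i + 1, n):
--             if P[j] - P[j - 1] == diff:
--                 length += 1
--                 max_len = max(max_len, length)
--             else:
--                 break
--     return max_len
-- ===== SOURCE B (Python) =====
-- def max_const_var_bottom_up(P):
--     n = len(P)
--     if n < 2:
--         return n
--     best = 1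
--     cur = 2
--     for x, y, z in zip(P, P[1:], P[2:]):
--         if z - y == y - x:
--             cur += 1
--             if cur > best:
--                 best = cur
--         else:
--             cur = 2
--     return best
-- ===== Notes on version B (the rewrite author's own statement) =====
-- stated objective: faster
-- what changed: A rescans an equal-difference run from every start index with a nested loop; B makes a single pass over consecutive triples, keeping the length of the current equal-difference run and the best length seen so far.
import Mathlib
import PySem

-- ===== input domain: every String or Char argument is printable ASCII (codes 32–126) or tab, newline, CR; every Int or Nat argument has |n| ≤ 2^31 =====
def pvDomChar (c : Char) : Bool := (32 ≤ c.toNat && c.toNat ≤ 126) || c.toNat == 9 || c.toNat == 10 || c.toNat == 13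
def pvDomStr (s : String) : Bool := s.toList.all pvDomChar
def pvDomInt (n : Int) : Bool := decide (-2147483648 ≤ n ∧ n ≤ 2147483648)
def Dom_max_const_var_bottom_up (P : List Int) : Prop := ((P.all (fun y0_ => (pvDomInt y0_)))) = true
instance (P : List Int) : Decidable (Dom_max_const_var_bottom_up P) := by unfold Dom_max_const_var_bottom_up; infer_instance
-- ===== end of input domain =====

-- B replaces A's quadratic restart-from-every-start scan by a single pass that
-- tracks the length of the current equal-difference run (objective: faster, O(n^2) → O(n)).

-- ===== PORT A =====
-- All list indices A uses are provably in range, so P[i] is ported as P.getD i 0.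
-- inner 'for j in range(i+1, n): … else: break' loop of A, carrying (length, max_len)
def pvInnerA (P : List Int) (diff : Int) (length maxLen : Int) (j : Nat) : Int :=
  if _h : j < P.length then
    if P.getD j 0 - P.getD (j - 1) 0 = diff then
      pvInnerA P diff (length + 1) (max maxLen (length + 1)) (j + 1)
    else maxLen
  else maxLen
termination_by P.length - j

def max_const_var_bottom_up (P : List Int) : Int :=
  if P.length < 2 then (P.length : Int)
  else (List.range' 1 (P.length - 1)).foldl
        (fun maxLen i => pvInnerA P (P.getD i 0 - P.getD (i - 1) 0) 2 maxLen (i + 1)) 1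

-- ===== PORT B =====
-- one step of B's loop over zip(P, P[1:], P[2:]) carrying (best, cur)
def pvStepB (bc : Int × Int) (t : Int × Int × Int) : Int × Int :=
  if t.2.2 - t.2.1 = t.2.1 - t.1 then
    let cur' := bc.2 + 1
    (if cur' > bc.1 then cur' else bc.1, cur')
  else (bc.1, 2)

def max_const_var_bottom_up_alt (P : List Int) : Int :=
  if P.length < 2 then (P.length : Int)
  else ((P.zip ((P.drop 1).zip (P.drop 2))).foldl pvStepB (1, 2)).1

-- ===== PRECONDITION & SPEC =====
def Spec_max_const_var_bottom_up (P : List Int) (out : Int) : Prop := out = max_const_var_bottom_up_alt P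
instance (P : List Int) (out : Int) : Decidable (Spec_max_const_var_bottom_up P out) := by unfold Spec_max_const_var_bottom_up; infer_instance

-- ===== CLAIM (what is proved, stated in full; the proofs are below) =====
def Claim_equal_max_const_var_bottom_up : Prop := ∀ (P : List Int), Dom_max_const_var_bottom_up P → Spec_max_const_var_bottom_up P (max_const_var_bottom_up P)

-- ===== LEMMAS AND PROOFS =====

-- length of the run of equal consecutive differences `diff` starting at index j
def pvRunlen (P : List Int) (diff : Int) (j : Nat) : Nat :=
  if _h : j < P.length then
    if P.getD j 0 - P.getD (j - 1) 0 = diff then pvRunlen P diff (j + 1) + 1 else 0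
  else 0
termination_by P.length - j

-- length of the streak of "second-difference zero" positions starting at index j
def pvStreak (P : List Int) (j : Nat) : Nat :=
  if _h : j < P.length then
    if P.getD j 0 - P.getD (j - 1) 0 = P.getD (j - 1) 0 - P.getD (j - 2) 0 then
      pvStreak P (j + 1) + 1
    else 0
  else 0
termination_by P.length - j

-- index form of A's outer loop (step at j corresponds to Python's i = j - 1)
def pvAidx (P : List Int) (j : Nat) (acc : Int) : Int :=
  if _h : j < P.length then
    pvAidx P (j + 1) (if pvStreak P j = 0 then acc else max acc (2 + (pvStreak P j : Int)))
  else acc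
termination_by P.length - j

-- index form of B's loop (step at k tests the second difference at index k)
def pvBidx (P : List Int) (k : Nat) (bc : Int × Int) : Int × Int :=
  if _h : k < P.length then
    pvBidx P (k + 1)
      (if P.getD k 0 - P.getD (k - 1) 0 = P.getD (k - 1) 0 - P.getD (k - 2) 0 then
        (max bc.1 (bc.2 + 1), bc.2 + 1)
      else (bc.1, 2))
  else bc
termination_by P.length - k

theorem pvInnerA_eq (P : List Int) (diff : Int) (length maxLen : Int) (j : Nat) :
    pvInnerA P diff length maxLen j =
      if pvRunlen P diff j = 0 then maxLen
      else max maxLen (length + (pvRunlen P diff j : Int)) := by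
  fun_induction pvInnerA P diff length maxLen j with
  | case1 len mL j h heq ih =>
    rw [pvRunlen, dif_pos h, if_pos heq, ih]
    by_cases hr : pvRunlen P diff (j + 1) = 0
    · simp [hr]
    · simp only [hr, if_false, Nat.add_eq_zero_iff]
      rw [max_assoc]
      congr 1
      rw [max_eq_right (by omega)]
      push_cast
      omega
  | case2 len mL j h heq => rw [pvRunlen, dif_pos h, if_neg heq]; simp
  | case3 len mL j h => rw [pvRunlen, dif_neg h]; simp

theorem pvRunlen_eq_streak (P : List Int) (j : Nat) :
    pvRunlen P (P.getD (j - 1) 0 - P.getD (j - 2) 0) j = pvStreak P j := by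
  fun_induction pvStreak P j with
  | case1 j h heq ih =>
    rw [pvRunlen, dif_pos h, if_pos heq]
    have h2 : (j + 1) - 2 = j - 1 := by omega
    rw [show P.getD (j - 1) 0 - P.getD (j - 2) 0 = P.getD ((j + 1) - 1) 0 - P.getD ((j + 1) - 2) 0 by
      rw [← heq]; simp [h2]]
    rw [ih]
  | case2 j h heq => rw [pvRunlen, dif_pos h, if_neg heq]
  | case3 j h => rw [pvRunlen, dif_neg h]

theorem pvAhead (P : List Int) (j : Nat) (acc : Int) (h : pvStreak P j ≠ 0) :
    pvAidx P j (max acc (2 + (pvStreak P j : Int))) = pvAidx P j acc := by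
  have hj : j < P.length := by
    by_contra hc
    exact h (by rw [pvStreak, dif_neg hc])
  conv_lhs => rw [pvAidx]
  conv_rhs => rw [pvAidx]
  simp only [dif_pos hj, if_neg h]
  congr 1
  rw [max_assoc, max_self]

theorem pvCentral (P : List Int) (i : Nat) (best cur : Int) (h : 2 ≤ cur) :
    (pvBidx P i (best, cur)).1 =
      pvAidx P i (if pvStreak P i = 0 then best else max best (cur + (pvStreak P i : Int))) := by
  induction hn : P.length - i using Nat.strong_induction_on generalizing i best cur with
  | _ n ih =>
  by_cases hi : i < P.length
  · rw [pvBidx, dif_pos hi]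
    by_cases hm : P.getD i 0 - P.getD (i - 1) 0 = P.getD (i - 1) 0 - P.getD (i - 2) 0
    · -- match: streak at i is streak at i+1, plus one
      have hs : pvStreak P i = pvStreak P (i + 1) + 1 := by
        rw [pvStreak, dif_pos hi, if_pos hm]
      rw [if_pos hm]
      have hrec := ih (P.length - (i + 1)) (by omega) (i + 1) (max best (cur + 1)) (cur + 1) (by omega) rfl
      rw [hrec]
      conv_rhs => rw [pvAidx]
      rw [dif_pos hi, if_neg (by omega : ¬pvStreak P i = 0), hs]
      congr 1
      by_cases hs1 : pvStreak P (i + 1) = 0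
      · simp only [hs1, Nat.succ_ne_zero, if_false]
        push_cast
        omega
      · have hs1' : 1 ≤ pvStreak P (i + 1) := by omega
        simp only [if_neg hs1, Nat.succ_ne_zero, if_false]
        push_cast
        omega
    · -- no match: streak at i is 0
      have hs : pvStreak P i = 0 := by rw [pvStreak, dif_pos hi, if_neg hm]
      rw [if_neg hm]
      have hrec := ih (P.length - (i + 1)) (by omega) (i + 1) best 2 le_rfl rfl
      rw [hrec]
      conv_rhs => rw [pvAidx]
      rw [dif_pos hi, if_pos hs, if_pos hs]
      by_cases hs1 : pvStreak P (i + 1) = 0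
      · rw [if_pos hs1]
      · rw [if_neg hs1]
        exact pvAhead P (i + 1) best hs1
  · have hs : pvStreak P i = 0 := by rw [pvStreak, dif_neg hi]
    rw [pvBidx, dif_neg hi, pvAidx, dif_neg hi, if_pos hs]

theorem pvBridgeA (P : List Int) (s c : Nat) (acc : Int) (hs : 1 ≤ s) (hc : s + c = P.length) :
    (List.range' s c).foldl
        (fun maxLen i => pvInnerA P (P.getD i 0 - P.getD (i - 1) 0) 2 maxLen (i + 1)) acc
      = pvAidx P (s + 1) acc := by
  induction c generalizing s acc with
  | zero =>
    rw [pvAidx, dif_neg (by omega)]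
    rfl
  | succ c ihc =>
    rw [List.range'_succ, List.foldl_cons, ihc (s + 1) _ (by omega) (by omega)]
    conv_rhs => rw [pvAidx]
    by_cases hlt : s + 1 < P.length
    · rw [dif_pos hlt]
      congr 1
      rw [pvInnerA_eq, ← pvRunlen_eq_streak P (s + 1)]
      rw [show (s + 1) - 1 = s by omega, show (s + 1) - 2 = s - 1 by omega]
    · rw [dif_neg hlt, pvAidx, dif_neg (by omega : ¬s + 1 + 1 < P.length),
        pvInnerA, dif_neg hlt]

theorem pvBridgeB (P : List Int) (k : Nat) (bc : Int × Int) :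
    ((P.drop k).zip ((P.drop (k + 1)).zip (P.drop (k + 2)))).foldl pvStepB bc
      = pvBidx P (k + 2) bc := by
  induction hn : P.length - k using Nat.strong_induction_on generalizing k bc with
  | _ n ih =>
  by_cases hk : k + 2 < P.length
  · have d1 : P.drop k = P[k] :: P.drop (k + 1) :=
      List.drop_eq_getElem_cons (by omega)
    have d2 : P.drop (k + 1) = P[k + 1] :: P.drop (k + 2) :=
      List.drop_eq_getElem_cons (by omega)
    have d3 : P.drop (k + 2) = P[k + 2] :: P.drop (k + 3) :=
      List.drop_eq_getElem_cons hk
    rw [d1, d2, d3, List.zip_cons_cons, List.zip_cons_cons, List.foldl_cons, ← d3, ← d2]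
    have hrec := ih (P.length - (k + 1)) (by omega) (k + 1)
      (pvStepB bc (P[k], P[k + 1], P[k + 2])) rfl
    simp only [show k + 1 + 1 = k + 2 from rfl, show k + 1 + 2 = k + 3 from rfl] at hrec
    rw [hrec]
    conv_rhs => rw [pvBidx]
    rw [dif_pos hk]
    congr 1
    simp only [pvStepB]
    have g0 : P.getD (k + 2) 0 = P[k + 2] := List.getD_eq_getElem P 0 hk
    have g1 : P.getD (k + 2 - 1) 0 = P[k + 1] := by
      rw [show k + 2 - 1 = k + 1 by omega]; exact List.getD_eq_getElem P 0 (by omega)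
    have g2 : P.getD (k + 2 - 2) 0 = P[k] := by
      rw [show k + 2 - 2 = k by omega]; exact List.getD_eq_getElem P 0 (by omega)
    rw [g0, g1, g2]
    by_cases hm : P[k + 2] - P[k + 1] = P[k + 1] - P[k]
    · simp only [if_pos hm]
      rw [Prod.mk.injEq]
      refine ⟨?_, rfl⟩
      rw [max_def]
      split_ifs <;> omega
    · simp only [if_neg hm]
  · have hz : (P.drop (k + 2)) = [] := List.drop_eq_nil_of_le (by omega)
    rw [hz]
    simp only [List.zip_nil_right, List.zip_nil_right, List.foldl_nil]
    rw [pvBidx, dif_neg hk]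

-- ===== VERDICT (by name: the statement is the Claim_ definition above) =====
theorem max_const_var_bottom_up_spec : Claim_equal_max_const_var_bottom_up := by
  intro P _
  unfold Spec_max_const_var_bottom_up max_const_var_bottom_up max_const_var_bottom_up_alt
  by_cases hn : P.length < 2
  · simp [hn]
  · simp only [hn, if_false]
    have hb : ((P.zip ((P.drop 1).zip (P.drop 2))).foldl pvStepB (1, 2)).1
        = (pvBidx P 2 (1, 2)).1 := by
      have := pvBridgeB P 0 (1, 2)
      simpa using congrArg Prod.fst this
    have ha : (List.range' 1 (P.length - 1)).foldl
        (fun maxLen i => pvInnerA P (P.getD i 0 - P.getD (i - 1) 0) 2 maxLen (i + 1)) 1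
        = pvAidx P 2 1 := pvBridgeA P 1 (P.length - 1) 1 le_rfl (by omega)
    rw [ha, hb, pvCentral P 2 1 2 le_rfl]
    by_cases hs : pvStreak P 2 = 0
    · simp [hs]
    · simp only [hs, if_false]
      exact (pvAhead P 2 1 hs).symm
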